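-- pv_equiv track=rewrite | github.com/melvincabatuan/PythonRefresher | hello_python5.py | numtomaxn
-- ===== SOURCE A (Python) =====
-- def numtomaxn(n):
--     """This function rearranges the digits of a number to
--        its maximum value possible
--     """
--     if type(n) is not int:
--         raise TypeError("Input an integer only")
--     digits = []
--     while n > 0:
--       digits.append(n%10)
--       n //= 10
--     digits.sort(reverse=True)
--     result = 0
--     for digit in digits:
--       result += digit
--       result *= 10
--     return result//10
-- ===== SOURCE B (Python) =====
-- def numtomaxn(n):
--     """Rearrange the digits of a number to its maximum value (counting sort)."""
--     if type(n) is not int: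
--         raise TypeError("Input an integer only")
--     count = [0] * 10
--     while n > 0:
--         count[n % 10] += 1
--         n //= 10
--     result = 0
--     for d in range(9, -1, -1):
--         for _ in range(count[d]):
--             result = result * 10 + d
--     return result
-- ===== Notes on version B (the rewrite author's own statement) =====
-- stated objective: alternative
-- what changed: Replaces collect-digits-then-comparison-sort with a counting sort: digit frequencies are tallied into a fixed array of per-digit slots during extraction, and the result is assembled by emitting each digit 9..0 its tallied number of times.
import Mathlib
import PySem

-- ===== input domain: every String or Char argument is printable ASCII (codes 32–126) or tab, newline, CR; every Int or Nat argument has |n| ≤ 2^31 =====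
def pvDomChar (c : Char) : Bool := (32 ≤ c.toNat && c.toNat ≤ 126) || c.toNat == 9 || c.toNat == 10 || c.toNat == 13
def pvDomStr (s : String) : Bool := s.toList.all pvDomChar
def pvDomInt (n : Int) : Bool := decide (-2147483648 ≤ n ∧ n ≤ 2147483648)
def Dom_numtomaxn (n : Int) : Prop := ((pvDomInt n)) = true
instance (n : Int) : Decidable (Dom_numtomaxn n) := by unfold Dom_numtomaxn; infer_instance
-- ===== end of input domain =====

-- B replaces A's collect-then-comparison-sort by a counting sort over the 10 digit values (objective: alternative).
-- The Lean argument is Int, so A's `type(n) is not int` TypeError branch is unreachable and not ported.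

-- ===== PORT A =====
-- while n > 0: digits.append(n%10); n //= 10
def pvDigitsA (n : Int) : List Int :=
  if h : 0 < n then
    PySem.Int.mod n 10 :: pvDigitsA (PySem.Int.floordiv n 10)
  else []
termination_by n.toNat
decreasing_by
  rw [PySem.Int.floordiv_eq_ediv_of_pos (by norm_num : (0:Int) < 10)]
  omega

def numtomaxn (n : Int) : Int :=
  -- digits.sort(reverse=True); for digit: result += digit; result *= 10; return result//10
  PySem.Int.floordiv
    ((PySem.List.sorted (pvDigitsA n) (fun x => x) true).foldl (fun r d => (r + d) * 10) 0) 10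

-- ===== PORT B =====
-- while n > 0: count[n % 10] += 1; n //= 10
-- (count[i] is read with pyGetD default 0; the index n % 10 is always in range for the reads Source B performs)
def pvCountLoop (n : Int) (c : List Int) : List Int :=
  if h : 0 < n then
    pvCountLoop (PySem.Int.floordiv n 10)
      (c.set (PySem.Int.mod n 10).toNat (PySem.List.pyGetD c (PySem.Int.mod n 10) 0 + 1))
  else c
termination_by n.toNat
decreasing_by
  rw [PySem.Int.floordiv_eq_ediv_of_pos (by norm_num : (0:Int) < 10)]
  omega

def numtomaxn_alt (n : Int) : Int :=
  -- count = pvCountLoop …; for d in range(9, -1, -1): for _ in range(count[d]): result = result * 10 + d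
  (PySem.List.pyRange 9 (-1) (-1)).foldl
    (fun r d =>
      (PySem.List.pyRange 0
        (PySem.List.pyGetD (pvCountLoop n (List.replicate 10 0)) d 0)).foldl
        (fun r _ => r * 10 + d) r) 0

-- ===== PRECONDITION & SPEC =====
def Spec_numtomaxn (n : Int) (out : Int) : Prop := out = numtomaxn_alt n
instance (n : Int) (out : Int) : Decidable (Spec_numtomaxn n out) := by unfold Spec_numtomaxn; infer_instance

-- ===== CLAIM (what is proved, stated in full; the proofs are below) =====
def Claim_equal_numtomaxn : Prop := ∀ (n : Int), Dom_numtomaxn n → Spec_numtomaxn n (numtomaxn n)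

-- ===== LEMMAS AND PROOFS =====

-- A's accumulation `(r+d)*10` then final `//10` is the plain digit accumulation `r*10+d`.
theorem pv_foldl_g (ds : List Int) (a : Int) :
    ds.foldl (fun r d => (r + d) * 10) (10 * a) = 10 * ds.foldl (fun r d => r * 10 + d) a := by
  induction ds generalizing a with
  | nil => rfl
  | cons d ds ih =>
    simp only [List.foldl_cons]
    have : (10 * a + d) * 10 = 10 * (a * 10 + d) := by ring
    rw [this, ih]

theorem pv_digitsA_range (n : Int) : ∀ x ∈ pvDigitsA n, 0 ≤ x ∧ x < 10 := by
  induction n using pvDigitsA.induct with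
  | case1 n h ih =>
    rw [pvDigitsA, dif_pos h]
    intro x hx
    rcases List.mem_cons.mp hx with hx | hx
    · subst hx
      exact ⟨PySem.Int.mod_nonneg _ (by norm_num), PySem.Int.mod_lt _ (by norm_num)⟩
    · exact ih x hx
  | case2 n h => rw [pvDigitsA, dif_neg h]; simp

theorem pv_countLoop_length (n : Int) (c : List Int) :
    (pvCountLoop n c).length = c.length := by
  induction n, c using pvCountLoop.induct with
  | case1 n c h ih => rw [pvCountLoop, dif_pos h]; rw [ih]; simp
  | case2 n c h => rw [pvCountLoop, dif_neg h]

-- the tallied array holds exactly the multiplicities of A's digit list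
theorem pv_countLoop_getD (n : Int) (c : List Int) (hc : c.length = 10)
    (d : Nat) (hd : d < 10) :
    (pvCountLoop n c).getD d 0 = c.getD d 0 + ((pvDigitsA n).count (d : Int) : Int) := by
  induction n, c using pvCountLoop.induct with
  | case1 n c h ih =>
    have hm0 : (0:Int) ≤ PySem.Int.mod n 10 := PySem.Int.mod_nonneg _ (by norm_num)
    have hm10 : PySem.Int.mod n 10 < 10 := PySem.Int.mod_lt _ (by norm_num)
    set i := (PySem.Int.mod n 10).toNat with hi
    have hilt : i < c.length := by omega
    rw [pvCountLoop, dif_pos h, pvDigitsA, dif_pos h]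
    rw [ih (by simp [hc])]
    rw [PySem.List.pyGetD_of_nonneg _ _ hm0]
    have hset : (c.set i (c.getD i 0 + 1)).getD d 0 =
        (if i = d then c.getD i 0 + 1 else c.getD d 0) := by
      simp only [List.getD, List.getElem?_set, hilt, if_true]
      split_ifs with hid
      · subst hid
        simp [List.getElem?_eq_getElem hilt]
      · rfl
    rw [hset]
    have hiff : ((PySem.Int.mod n 10 == (d : Int)) = true) ↔ i = d := by
      simp only [beq_iff_eq]
      omega
    have hcnt : (PySem.Int.mod n 10 :: pvDigitsA (PySem.Int.floordiv n 10)).count (d : Int) =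
        (pvDigitsA (PySem.Int.floordiv n 10)).count (d : Int) +
          (if i = d then 1 else 0) := by
      rw [List.count_cons]
      congr 1
      by_cases hid : i = d
      · rw [if_pos (hiff.mpr hid), if_pos hid]
      · rw [if_neg (fun hh => hid (hiff.mp hh)), if_neg hid]
    rw [hcnt]
    split_ifs with hid
    · rw [hid]
      push_cast
      ring
    · push_cast
      ring
  | case2 n c h =>
    rw [pvCountLoop, dif_neg h, pvDigitsA, dif_neg h]
    simp

-- counting multiplicities in the counting-sort output
theorem pv_count_flatMap (L : List Int) (hL : L.Nodup) (ds : List Int) (x : Int) :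
    ((L.flatMap fun d => List.replicate (ds.count d) d).count x) =
      if x ∈ L then ds.count x else 0 := by
  induction L with
  | nil => simp
  | cons d L ih =>
    rcases List.nodup_cons.mp hL with ⟨hdL, hL'⟩
    rw [List.flatMap_cons, List.count_append, ih hL', List.count_replicate]
    by_cases hxd : x = d
    · subst hxd
      simp [hdL]
    · simp [hxd, Ne.symm hxd]

theorem pv_pairwise_flatMap (L : List Int) (hL : L.Pairwise (fun a b => b ≤ a)) (ds : List Int) :
    (L.flatMap fun d => List.replicate (ds.count d) d).Pairwise (fun a b => b ≤ a) := by
  induction L with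
  | nil => simp
  | cons d L ih =>
    rcases List.pairwise_cons.mp hL with ⟨hd, hL'⟩
    rw [List.flatMap_cons]
    rw [List.pairwise_append]
    refine ⟨List.pairwise_replicate.mpr (Or.inr le_rfl), ih hL', ?_⟩
    intro a ha b hb
    rcases List.mem_flatMap.mp hb with ⟨e, heL, hbe⟩
    rw [List.eq_of_mem_replicate ha, List.eq_of_mem_replicate hbe]
    exact hd e heL

def pvDesc (ds : List Int) : List Int :=
  ([9,8,7,6,5,4,3,2,1,0] : List Int).flatMap fun d => List.replicate (ds.count d) d

-- the descending sort of a list of digits 0..9 IS the counting-sort output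
theorem pv_sorted_eq_desc (ds : List Int) (h : ∀ x ∈ ds, 0 ≤ x ∧ x < 10) :
    PySem.List.sorted ds (fun x => x) true = pvDesc ds := by
  have hperm : (pvDesc ds).Perm ds := by
    rw [List.perm_iff_count]
    intro x
    rw [pvDesc, pv_count_flatMap _ (by decide) ds x]
    by_cases hx : x ∈ ([9,8,7,6,5,4,3,2,1,0] : List Int)
    · rw [if_pos hx]
    · rw [if_neg hx]
      symm
      rw [List.count_eq_zero]
      intro hxds
      rcases h x hxds with ⟨h0, h10⟩
      apply hx
      interval_cases x <;> decide
  have hp1 : (PySem.List.sorted ds (fun x => x) true).Pairwise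
      (fun a b : Int => (fun x : Int => -x) a ≤ (fun x : Int => -x) b) := by
    have := PySem.List.sorted_pairwise_rev ds (fun x : Int => x)
    exact this.imp (by intro a b hab; simpa using hab)
  have hp2 : (pvDesc ds).Pairwise
      (fun a b : Int => (fun x : Int => -x) a ≤ (fun x : Int => -x) b) := by
    have := pv_pairwise_flatMap ([9,8,7,6,5,4,3,2,1,0] : List Int) (by decide) ds
    exact this.imp (by intro a b hab; simpa using hab)
  exact PySem.List.eq_of_perm_of_pairwise_le_of_injective (fun x : Int => -x)
    neg_injective ((PySem.List.sorted_perm ds _ true).trans hperm.symm) hp1 hp2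

-- a fold that ignores its element only depends on the length
theorem pv_foldl_replicate {α : Type} (l : List α) (r d : Int) :
    l.foldl (fun r _ => r * 10 + d) r =
      (List.replicate l.length d).foldl (fun r e => r * 10 + e) r := by
  induction l generalizing r with
  | nil => rfl
  | cons a l ih => simpa [List.replicate_succ] using ih (r * 10 + d)

theorem pv_numtomaxn_eq (n : Int) :
    numtomaxn n = (PySem.List.sorted (pvDigitsA n) (fun x => x) true).foldl
      (fun r d => r * 10 + d) 0 := by
  unfold numtomaxn
  have h0 : (0:Int) = 10 * 0 := by norm_num
  rw [h0, pv_foldl_g]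

  rw [PySem.Int.floordiv_eq_ediv_of_pos (by norm_num : (0:Int) < 10)]
  rw [Int.mul_ediv_cancel_left _ (by norm_num : (10:Int) ≠ 0)]
  norm_num

theorem pv_numtomaxn_alt_eq (n : Int) :
    numtomaxn_alt n = (pvDesc (pvDigitsA n)).foldl (fun r d => r * 10 + d) 0 := by
  unfold numtomaxn_alt
  rw [pvDesc, List.foldl_flatMap]
  have hrange : PySem.List.pyRange 9 (-1) (-1) = ([9,8,7,6,5,4,3,2,1,0] : List Int) := by decide
  rw [hrange]
  apply PySem.List.foldl_congr_mem
  intro r d hd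
  have hcl : (pvCountLoop n (List.replicate 10 0)).length = 10 := by
    rw [pv_countLoop_length]; simp
  have hd10 : d.toNat < 10 ∧ (d.toNat : Int) = d ∧ 0 ≤ d := by
    fin_cases hd <;> simp
  have hget : PySem.List.pyGetD (pvCountLoop n (List.replicate 10 0)) d 0 =
      (((pvDigitsA n).count d : Nat) : Int) := by
    rw [PySem.List.pyGetD_of_nonneg _ _ hd10.2.2]
    rw [pv_countLoop_getD n _ (by simp) d.toNat hd10.1]
    rw [hd10.2.1]
    rw [List.getD_eq_getElem?_getD, List.getElem?_replicate]
    simp [hd10.1]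
  rw [hget, PySem.List.pyRange_zero_natCast]
  rw [pv_foldl_replicate]
  simp

-- ===== VERDICT (by name: the statement is the Claim_ definition above) =====
theorem numtomaxn_spec : Claim_equal_numtomaxn := by
  intro n _
  unfold Spec_numtomaxn
  rw [pv_numtomaxn_eq, pv_numtomaxn_alt_eq,
    pv_sorted_eq_desc (pvDigitsA n) (pv_digitsA_range n)]
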